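-- pv_equiv track=rewrite | github.com/nfredmond/clawmodeler | clawmodeler_engine/report.py | build_headlines
-- ===== SOURCE A (Python) =====
-- from typing import Any
--
-- def build_headlines(
--     fact_blocks: list[dict[str, Any]],
--     manifest: dict[str, Any],
-- ) -> list[dict[str, str]]:
--     headlines: list[dict[str, str]] = []
--
--     vmt_blocks = [block for block in fact_blocks if block.get("fact_type") == "vmt_screening"]
--     for block in vmt_blocks:
--         headlines.append(
--             {
--                 "label": f"Daily VMT — {block.get('scenario_id') or 'scenario'}",
--                 "value": _extract_numeric_phrase(block.get("claim_text", ""), suffix=" VMT"),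
--                 "context": "Screening-level per-capita proxy.",
--             }
--         )
--
--     delta_blocks = [
--         block for block in fact_blocks if block.get("fact_type") == "accessibility_delta"
--     ]
--     for block in delta_blocks:
--         headlines.append(
--             {
--                 "label": f"Jobs-access delta — {block.get('scenario_id')}",
--                 "value": _extract_numeric_phrase(block.get("claim_text", ""), suffix=" jobs"),
--                 "context": "Change in proxy jobs accessible vs. baseline.",
--             }
--         )
--
--     score_blocks = [block for block in fact_blocks if block.get("fact_type") == "project_scoring"]
--     for block in score_blocks[:1]:
--         headlines.append(
--             {
--                 "label": "Top-ranked project",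
--                 "value": block.get("claim_text", ""),
--                 "context": "From the weighted rubric.",
--             }
--         )
--
--     fact_count = len(fact_blocks)
--     if fact_count:
--         headlines.append(
--             {
--                 "label": "Evidence depth",
--                 "value": f"{fact_count} fact-blocks",
--                 "context": "Every claim in this report is grounded in one.",
--             }
--         )
--     return headlines[:6]
--
-- def _extract_numeric_phrase(text: str, *, suffix: str) -> str:
--     return text.strip() or f"— {suffix.strip()}"
-- ===== SOURCE B (Python) =====
-- def _extract_numeric_phrase(text, *, suffix):
--     return text.strip() or f"— {suffix.strip()}"
--
--
-- def _vmt_line(block):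
--     return {
--         "label": f"Daily VMT — {block.get('scenario_id') or 'scenario'}",
--         "value": _extract_numeric_phrase(block.get("claim_text", ""), suffix=" VMT"),
--         "context": "Screening-level per-capita proxy.",
--     }
--
--
-- def _delta_line(block):
--     return {
--         "label": f"Jobs-access delta — {block.get('scenario_id')}",
--         "value": _extract_numeric_phrase(block.get("claim_text", ""), suffix=" jobs"),
--         "context": "Change in proxy jobs accessible vs. baseline.",
--     }
--
--
-- def _score_line(block):
--     return {
--         "label": "Top-ranked project",
--         "value": block.get("claim_text", ""),
--         "context": "From the weighted rubric.",
--     }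
--
--
-- def build_headlines(fact_blocks, manifest):
--     # One bucketing pass over fact_blocks, then a separate emission phase.
--     buckets = {}
--     for block in fact_blocks:
--         buckets.setdefault(block.get("fact_type"), []).append(block)
--
--     headlines = (
--         [_vmt_line(b) for b in buckets.get("vmt_screening", [])]
--         + [_delta_line(b) for b in buckets.get("accessibility_delta", [])]
--         + [_score_line(b) for b in buckets.get("project_scoring", [])[:1]]
--     )
--     if fact_blocks:
--         headlines.append(
--             {
--                 "label": "Evidence depth",
--                 "value": f"{len(fact_blocks)} fact-blocks",
--                 "context": "Every claim in this report is grounded in one.",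
--             }
--         )
--     return headlines[:6]
-- ===== Notes on version B (the rewrite author's own statement) =====
-- stated objective: alternative
-- what changed: A's three separate filtering scans of fact_blocks are replaced by one dict-bucketing pass (fact_type -> blocks, insertion-ordered) followed by an emission phase that concatenates per-bucket comprehensions; the evidence line and [:6] truncation are kept.
import Mathlib
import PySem

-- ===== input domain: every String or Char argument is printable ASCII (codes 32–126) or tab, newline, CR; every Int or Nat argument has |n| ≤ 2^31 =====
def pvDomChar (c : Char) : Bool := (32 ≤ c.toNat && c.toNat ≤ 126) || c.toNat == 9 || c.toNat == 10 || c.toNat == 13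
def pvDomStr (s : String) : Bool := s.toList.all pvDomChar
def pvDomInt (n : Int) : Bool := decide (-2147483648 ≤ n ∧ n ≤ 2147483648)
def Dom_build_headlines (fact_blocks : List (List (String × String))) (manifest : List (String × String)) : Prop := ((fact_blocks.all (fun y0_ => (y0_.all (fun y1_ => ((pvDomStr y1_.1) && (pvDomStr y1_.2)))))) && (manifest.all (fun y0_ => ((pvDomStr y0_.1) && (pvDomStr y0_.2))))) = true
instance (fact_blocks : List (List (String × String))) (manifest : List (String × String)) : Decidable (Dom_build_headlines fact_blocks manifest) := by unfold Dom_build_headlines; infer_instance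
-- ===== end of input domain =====

-- B replaces A's three filtering scans over fact_blocks by one dict-bucketing pass
-- (fact_type -> blocks) plus a separate emission phase (objective: alternative decomposition).


-- shared module helpers
-- block.get(k): first-match lookup in the association list (exact for a Python dict)
def pvGetKey (b : List (String × String)) (k : String) : Option String :=
  (b.find? (fun p => p.1 == k)).map (·.2)

-- _extract_numeric_phrase(text, suffix): text.strip() or f"— {suffix.strip()}"
def extract_numeric_phrase (text : String) (suffix : String) : String :=
  if PySem.Str.strip text == "" then "— " ++ PySem.Str.strip suffix else PySem.Str.strip text

-- ===== PORT A =====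
def build_headlines (fact_blocks : List (List (String × String))) (manifest : List (String × String)) : List (List (String × String)) :=
  let headlines : List (List (String × String)) := []
  let vmt_blocks := fact_blocks.filter (fun b => pvGetKey b "fact_type" == some "vmt_screening")
  let headlines := vmt_blocks.foldl (fun acc b =>
    acc ++ [[("label", "Daily VMT — " ++ (match pvGetKey b "scenario_id" with
                                          | some s => if s == "" then "scenario" else s
                                          | none => "scenario")),
             ("value", extract_numeric_phrase ((pvGetKey b "claim_text").getD "") " VMT"),
             ("context", "Screening-level per-capita proxy.")]]) headlines
  let delta_blocks := fact_blocks.filter (fun b => pvGetKey b "fact_type" == some "accessibility_delta")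
  let headlines := delta_blocks.foldl (fun acc b =>
    acc ++ [[("label", "Jobs-access delta — " ++ (match pvGetKey b "scenario_id" with
                                                  | some s => s
                                                  | none => "None")),
             ("value", extract_numeric_phrase ((pvGetKey b "claim_text").getD "") " jobs"),
             ("context", "Change in proxy jobs accessible vs. baseline.")]]) headlines
  let score_blocks := fact_blocks.filter (fun b => pvGetKey b "fact_type" == some "project_scoring")
  let headlines := (PySem.List.slice score_blocks none (some 1)).foldl (fun acc b =>
    acc ++ [[("label", "Top-ranked project"),
             ("value", (pvGetKey b "claim_text").getD ""),
             ("context", "From the weighted rubric.")]]) headlines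
  let fact_count := fact_blocks.length
  let headlines := if fact_count ≠ 0 then
      headlines ++ [[("label", "Evidence depth"),
                     ("value", PySem.Int.toStr (fact_count : Int) ++ " fact-blocks"),
                     ("context", "Every claim in this report is grounded in one.")]]
    else headlines
  PySem.List.slice headlines none (some 6)

-- ===== PORT B =====
def vmt_line (b : List (String × String)) : List (String × String) :=
  [("label", "Daily VMT — " ++ (match pvGetKey b "scenario_id" with
                                | some s => if s == "" then "scenario" else s
                                | none => "scenario")),
   ("value", extract_numeric_phrase ((pvGetKey b "claim_text").getD "") " VMT"),
   ("context", "Screening-level per-capita proxy.")]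

def delta_line (b : List (String × String)) : List (String × String) :=
  [("label", "Jobs-access delta — " ++ (match pvGetKey b "scenario_id" with
                                        | some s => s
                                        | none => "None")),
   ("value", extract_numeric_phrase ((pvGetKey b "claim_text").getD "") " jobs"),
   ("context", "Change in proxy jobs accessible vs. baseline.")]

def score_line (b : List (String × String)) : List (String × String) :=
  [("label", "Top-ranked project"),
   ("value", (pvGetKey b "claim_text").getD ""),
   ("context", "From the weighted rubric.")]

def build_headlines_alt (fact_blocks : List (List (String × String))) (manifest : List (String × String)) : List (List (String × String)) :=
  -- one bucketing pass: fact_type -> blocks of that type, in order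
  let buckets : PySem.Dict (Option String) (List (List (String × String))) :=
    fact_blocks.foldl (fun d b => d.modify (pvGetKey b "fact_type") [] (· ++ [b])) PySem.Dict.empty
  -- emission phase
  let headlines :=
    (buckets.getD (some "vmt_screening") []).map vmt_line
    ++ (buckets.getD (some "accessibility_delta") []).map delta_line
    ++ (PySem.List.slice (buckets.getD (some "project_scoring") []) none (some 1)).map score_line
  let headlines := if fact_blocks ≠ [] then
      headlines ++ [[("label", "Evidence depth"),
                     ("value", PySem.Int.toStr (fact_blocks.length : Int) ++ " fact-blocks"),
                     ("context", "Every claim in this report is grounded in one.")]]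
    else headlines
  PySem.List.slice headlines none (some 6)

-- ===== PRECONDITION & SPEC =====
def Spec_build_headlines (fact_blocks : List (List (String × String))) (manifest : List (String × String)) (out : List (List (String × String))) : Prop := out = build_headlines_alt fact_blocks manifest
instance (fact_blocks : List (List (String × String))) (manifest : List (String × String)) (out : List (List (String × String))) : Decidable (Spec_build_headlines fact_blocks manifest out) := by unfold Spec_build_headlines; infer_instance

-- ===== CLAIM (what is proved, stated in full; the proofs are below) =====
def Claim_equal_build_headlines : Prop := ∀ (fact_blocks : List (List (String × String))) (manifest : List (String × String)), Dom_build_headlines fact_blocks manifest → Spec_build_headlines fact_blocks manifest (build_headlines fact_blocks manifest)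

-- ===== LEMMAS AND PROOFS =====

-- B's bucket for a given fact_type is exactly A's filter of fact_blocks for that type.
theorem bucket_eq_filter (fact_blocks : List (List (String × String))) (c : Option String) :
    (fact_blocks.foldl (fun d b => d.modify (pvGetKey b "fact_type") [] (· ++ [b]))
      (PySem.Dict.empty : PySem.Dict (Option String) (List (List (String × String))))).getD c []
    = fact_blocks.filter (fun b => pvGetKey b "fact_type" == c) := by
  have h := PySem.Dict.getD_foldl_modify_append
    (l := fact_blocks.map (fun b => (pvGetKey b "fact_type", b)))
    (d := (PySem.Dict.empty : PySem.Dict (Option String) (List (List (String × String))))) (c := c)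
  simp only [List.foldl_map] at h
  rw [h]
  simp [List.filter_map, Function.comp_def]

theorem build_headlines_eq (fact_blocks : List (List (String × String))) (manifest : List (String × String)) :
    build_headlines fact_blocks manifest = build_headlines_alt fact_blocks manifest := by
  unfold build_headlines build_headlines_alt
  simp only [bucket_eq_filter, PySem.List.foldl_append_singleton_eq_map,
    List.nil_append, List.append_assoc, ne_eq, List.length_eq_zero_iff]
  rfl

-- ===== VERDICT (by name: the statement is the Claim_ definition above) =====
theorem build_headlines_spec : Claim_equal_build_headlines := by
  intro fb m _
  unfold Spec_build_headlines
  exact build_headlines_eq fb m
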